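-- pv_equiv track=rewrite | github.com/Azure/azure-cli | tools/automation/cli_linter/util.py | get_cmd_param_list_from_example
-- ===== SOURCE A (Python) =====
-- def get_cmd_param_list_from_example(example_text):
--
--     def process_short_option(option): # handle options like -otable
--         if len(option) > 2 and option[0] == "-" and option[0] != option[1]:
--             return option[0:2]
--         else:
--             return option
--
--     CMD_PREFIX = "az "
--     commands = []  # some examples have multistep commands. This is a simple way to extract them
--     while(CMD_PREFIX in example_text):
--         # find next az command start and end
--         start = example_text.find(CMD_PREFIX)
--         end = example_text.find(CMD_PREFIX, start + 1)
--         end = end if end > -1 else len(example_text)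
--         # extract command
--         cmd_text = example_text[start:end]
--         # update example text
--         example_text = example_text[end:]
--         # remove piping from cmd_text
--         end = cmd_text.find("|")
--         end = end if end > -1 else len(cmd_text)
--         cmd_text = cmd_text[:end]
--         # add to commands list
--         commands.append(cmd_text)
--
--
--     cmd_param_list = []
--     for command in commands:
--         idx = command.find(" -")  # Todo: positionals?
--         command_body = command[:idx].strip()
--         parameters = [maybe_opt for maybe_opt in command[idx:].split() if maybe_opt.startswith("-")]
--         parameters = list(map(process_short_option, parameters)) # process short options like -otable
--         cmd_param_list.append((command_body, parameters))
--
--     return cmd_param_list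
-- ===== SOURCE B (Python) =====
-- def get_cmd_param_list_from_example(example_text):
--
--     def process_short_option(option):  # handle options like -otable
--         if len(option) > 2 and option[0] == "-" and option[0] != option[1]:
--             return option[0:2]
--         else:
--             return option
--
--     # One pass: split on "az ", drop the text before the first command, and
--     # process each segment directly into its (command_body, parameters) pair.
--     cmd_param_list = []
--     for segment in example_text.split("az ")[1:]:
--         command = "az " + segment
--         pipe = command.find("|")
--         if pipe != -1:
--             command = command[:pipe]
--         idx = command.find(" -")
--         command_body = command[:idx].strip()
--         parameters = [process_short_option(o) for o in command[idx:].split() if o.startswith("-")]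
--         cmd_param_list.append((command_body, parameters))
--     return cmd_param_list
-- ===== Notes on version B (the rewrite author's own statement) =====
-- stated objective: simpler
-- what changed: The while/find/re-slice command-extraction loop is replaced by one split('az ') whose tail segments are each processed directly (split, pipe-truncate and parameter-parse fused into a single pass), instead of first building a commands list by repeated scanning and slicing of example_text.
import Mathlib
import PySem

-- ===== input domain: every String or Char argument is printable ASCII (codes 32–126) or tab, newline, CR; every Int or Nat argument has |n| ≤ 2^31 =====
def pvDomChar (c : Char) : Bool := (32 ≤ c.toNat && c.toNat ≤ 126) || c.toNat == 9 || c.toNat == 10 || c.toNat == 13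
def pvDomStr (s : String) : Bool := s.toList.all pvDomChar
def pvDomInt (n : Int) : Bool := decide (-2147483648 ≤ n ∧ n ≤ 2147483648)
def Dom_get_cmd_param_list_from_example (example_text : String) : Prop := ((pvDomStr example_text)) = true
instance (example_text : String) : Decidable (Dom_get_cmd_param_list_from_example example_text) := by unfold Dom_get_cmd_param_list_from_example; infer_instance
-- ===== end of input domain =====

-- B replaces A's while/find/re-slice command-extraction loop by one split on "az " whose tail
-- segments are processed directly in a single fused pass (objective: simpler); return values proved equal.

-- "az " as a char list, shared constant of both ports
def pvAZ : List Char := ['a', 'z', ' ']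

-- ===== PORT A =====
-- helper: process_short_option (A's inner def)
def pvShortOptA (option : List Char) : List Char :=
  if 2 < option.length ∧ PySem.List.pyGet? option 0 = some '-' ∧
      PySem.List.pyGet? option 0 ≠ PySem.List.pyGet? option 1 then
    PySem.List.slice option (some 0) (some 2)
  else option

-- helper: one iteration of A's second (parameter-parsing) for-loop
def pvParamsA (command : List Char) : String × List String :=
  let idx := PySem.Chars.find command [' ', '-']
  let command_body := PySem.Chars.strip (PySem.List.slice command none (some idx))
  let parameters := (PySem.Chars.split₀ (PySem.List.slice command (some idx) none)).filter
      (fun o => PySem.Chars.startswith o ['-'])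
  (String.ofList command_body, ((parameters.map pvShortOptA).map String.ofList))

-- termination helper for the while loop (cited in decreasing_by)
theorem pvSliceFromLenLt (s : List Char) (e : Int) (he : 1 ≤ e) (hs : 1 ≤ s.length) :
    (PySem.List.slice s (some e)).length < s.length := by
  rw [PySem.List.slice_from s (by omega : (0:Int) ≤ e)]
  simp only [List.length_drop]
  omega

theorem pvFindFromGe (s sub : List Char) (st : Int) (h0 : 0 ≤ st)
    (h : PySem.Chars.findFrom s sub st > -1) : st ≤ PySem.Chars.findFrom s sub st := by
  have hf := PySem.Chars.neg_one_le_find (List.drop st.toNat (List.take (s.length:Int).toNat s)) sub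
  simp only [PySem.Chars.findFrom, not_lt.mpr h0, if_false] at h ⊢
  split_ifs at h ⊢ <;> omega

-- A's while loop, accumulating the commands list
def pvLoopA (s : List Char) (acc : List (List Char)) : List (List Char) :=
  if PySem.Chars.isIn pvAZ s = true then
    let start := PySem.Chars.find s pvAZ
    let e0 := PySem.Chars.findFrom s pvAZ (start + 1)
    let e := if e0 > -1 then e0 else (s.length : Int)
    let cmd := PySem.List.slice s (some start) (some e)
    let s' := PySem.List.slice s (some e)
    let p0 := PySem.Chars.find cmd ['|']
    let p := if p0 > -1 then p0 else (cmd.length : Int)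
    pvLoopA s' (acc ++ [PySem.List.slice cmd none (some p)])
  else acc
termination_by s.length
decreasing_by
  rename_i h
  have hinf : pvAZ <:+: s := (PySem.Chars.isIn_iff_infix pvAZ s).mp h
  have hlen : 3 ≤ s.length := by
    have := hinf.length_le
    simpa [pvAZ] using this
  have hst : 0 ≤ PySem.Chars.find s pvAZ := (PySem.Chars.find_nonneg_iff s pvAZ).mpr hinf
  refine pvSliceFromLenLt _ _ ?_ (by omega)
  split
  · rename_i hgt
    have := pvFindFromGe s pvAZ (PySem.Chars.find s pvAZ + 1) (by omega) hgt
    omega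
  · omega

def get_cmd_param_list_from_example (example_text : String) : List (String × List String) :=
  (pvLoopA example_text.toList []).map pvParamsA

-- ===== PORT B =====
-- helper: process_short_option (B's inner def, same code as in Source B)
def pvShortOptB (option : List Char) : List Char :=
  if 2 < option.length ∧ PySem.List.pyGet? option 0 = some '-' ∧
      PySem.List.pyGet? option 0 ≠ PySem.List.pyGet? option 1 then
    PySem.List.slice option (some 0) (some 2)
  else option

-- helper: B's single fused pass over one split segment
def pvSegB (segment : List Char) : String × List String :=
  let command := pvAZ ++ segment
  let pipe := PySem.Chars.find command ['|']
  let command := if pipe ≠ -1 then PySem.List.slice command none (some pipe) else command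
  let idx := PySem.Chars.find command [' ', '-']
  let command_body := PySem.Chars.strip (PySem.List.slice command none (some idx))
  let parameters := (PySem.Chars.split₀ (PySem.List.slice command (some idx) none)).filter
      (fun o => PySem.Chars.startswith o ['-'])
  (String.ofList command_body, ((parameters.map pvShortOptB).map String.ofList))

def get_cmd_param_list_from_example_alt (example_text : String) : List (String × List String) :=
  (PySem.List.slice (PySem.Chars.splitOn example_text.toList pvAZ) (some 1)).map pvSegB

-- ===== PRECONDITION & SPEC =====
def Spec_get_cmd_param_list_from_example (example_text : String) (out : List (String × List String)) : Prop := out = get_cmd_param_list_from_example_alt example_text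
instance (example_text : String) (out : List (String × List String)) : Decidable (Spec_get_cmd_param_list_from_example example_text out) := by unfold Spec_get_cmd_param_list_from_example; infer_instance

-- ===== CLAIM (what is proved, stated in full; the proofs are below) =====
def Claim_equal_get_cmd_param_list_from_example : Prop := ∀ (example_text : String), Dom_get_cmd_param_list_from_example example_text → Spec_get_cmd_param_list_from_example example_text (get_cmd_param_list_from_example example_text)

-- ===== LEMMAS AND PROOFS =====


theorem pvFindGoShift (sub : List Char) : ∀ (t : List Char) (k : Nat),
    PySem.Chars.find.go sub t k =
      if PySem.Chars.find.go sub t 0 = -1 then -1 else PySem.Chars.find.go sub t 0 + k := by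
  intro t
  induction t with
  | nil =>
    intro k
    simp [PySem.Chars.find.go]
    split_ifs <;> simp
  | cons c rest ih =>
    intro k
    rw [PySem.Chars.find.go]
    conv_rhs => rw [PySem.Chars.find.go]
    by_cases hp : sub.isPrefixOf (c :: rest) = true
    · simp [hp]
    · simp only [hp, if_false, Bool.false_eq_true]
      rw [ih (k + 1), ih 1]
      have h0 : -1 ≤ PySem.Chars.find.go sub rest 0 := by
        have := PySem.Chars.neg_one_le_find rest sub
        simpa [PySem.Chars.find] using this
      split_ifs <;> omega

theorem pvFindCons (sub : List Char) (c : Char) (t : List Char) :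
    PySem.Chars.find (c :: t) sub =
      if sub.isPrefixOf (c :: t) then 0
      else if PySem.Chars.find t sub = -1 then -1 else PySem.Chars.find t sub + 1 := by
  unfold PySem.Chars.find
  conv_lhs => rw [PySem.Chars.find.go]
  by_cases hp : sub.isPrefixOf (c :: t) = true
  · simp [hp]
  · simp only [hp, if_false, Bool.false_eq_true]
    rw [pvFindGoShift]
    norm_num

theorem pvFindNil (sub : List Char) :
    PySem.Chars.find [] sub = if sub.isEmpty then 0 else -1 := by
  unfold PySem.Chars.find
  rw [PySem.Chars.find.go]
  norm_num



theorem pvFindSplit (l : List Char) (j : Nat) (h : PySem.Chars.find l pvAZ = (j : Int)) :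
    List.drop j l = pvAZ ++ List.drop (j + 3) l ∧ j + 3 ≤ l.length := by
  have h0 : 0 ≤ PySem.Chars.find l pvAZ := by omega
  have hs := (PySem.Chars.find_spec h0).1
  rw [h] at hs
  simp only [Int.toNat_natCast] at hs
  obtain ⟨t, ht⟩ := hs
  have hlen : (List.drop j l).length = 3 + t.length := by
    rw [← ht]; simp [pvAZ]; omega
  have hj : j + 3 ≤ l.length := by
    simp only [List.length_drop] at hlen; omega
  have hdd : List.drop (j + 3) l = t := by
    have : List.drop 3 (List.drop j l) = t := by
      rw [← ht]; simp [pvAZ]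
    rw [← this, List.drop_drop]
  exact ⟨by rw [hdd]; exact ht.symm, hj⟩

def pvSr : Nat → List Char → List (List Char)
  | 0, l => [l]
  | f+1, l =>
    if PySem.Chars.find l pvAZ = -1 then [l]
    else List.take (PySem.Chars.find l pvAZ).toNat l ::
      pvSr f (List.drop ((PySem.Chars.find l pvAZ).toNat + 3) l)

theorem pvSr_fuel : ∀ (n : Nat), ∀ (l : List Char), l.length ≤ n →
    ∀ (f₁ f₂ : Nat), l.length < f₁ → l.length < f₂ → pvSr f₁ l = pvSr f₂ l := by
  intro n
  induction n with
  | zero =>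
    intro l hl f₁ f₂ h1 h2
    have : l = [] := List.length_eq_zero_iff.mp (by omega)
    subst this
    obtain ⟨g₁, rfl⟩ := Nat.exists_eq_succ_of_ne_zero (by omega : f₁ ≠ 0)
    obtain ⟨g₂, rfl⟩ := Nat.exists_eq_succ_of_ne_zero (by omega : f₂ ≠ 0)
    simp [pvSr, pvFindNil, pvAZ]
  | succ m ih =>
    intro l hl f₁ f₂ h1 h2
    obtain ⟨g₁, rfl⟩ := Nat.exists_eq_succ_of_ne_zero (by omega : f₁ ≠ 0)
    obtain ⟨g₂, rfl⟩ := Nat.exists_eq_succ_of_ne_zero (by omega : f₂ ≠ 0)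
    by_cases hf : PySem.Chars.find l pvAZ = -1
    · simp [pvSr, hf]
    · have h0 : 0 ≤ PySem.Chars.find l pvAZ := by
        have := PySem.Chars.neg_one_le_find l pvAZ; omega
      set j : Nat := (PySem.Chars.find l pvAZ).toNat with hj
      have hfj : PySem.Chars.find l pvAZ = (j : Int) := by omega
      obtain ⟨-, hj3⟩ := pvFindSplit l j hfj
      simp only [pvSr, hf, if_false]
      rw [ih (List.drop (j + 3) l) (by simp; omega) g₁ g₂ (by simp; omega) (by simp; omega)]

def pvConsHead (pre : List Char) : List (List Char) → List (List Char)
  | [] => [pre]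
  | h :: t => (pre ++ h) :: t

theorem pvSrNeNil (f : Nat) (l : List Char) : pvSr f l ≠ [] := by
  cases f <;> simp [pvSr] <;> (try split) <;> simp

theorem pvConsHeadNil (xs : List (List Char)) (h : xs ≠ []) : pvConsHead [] xs = xs := by
  cases xs with
  | nil => exact absurd rfl h
  | cons a t => simp [pvConsHead]

theorem pvGoEqSr : ∀ (n : Nat), ∀ (l : List Char), l.length ≤ n →
    ∀ (fuel : Nat) (cur : List Char) (acc : List (List Char)), l.length < fuel →
    PySem.Chars.splitOn.go pvAZ fuel l cur acc
      = acc.reverse ++ pvConsHead cur.reverse (pvSr fuel l) := by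
  intro n
  induction n with
  | zero =>
    intro l hl fuel cur acc hf
    have : l = [] := List.length_eq_zero_iff.mp (by omega)
    subst this
    obtain ⟨g, rfl⟩ := Nat.exists_eq_succ_of_ne_zero (by omega : fuel ≠ 0)
    rw [PySem.Chars.splitOn.go]
    · simp [pvSr, pvFindNil, pvAZ, pvConsHead]
    · omega
  | succ m ih =>
    intro l hl fuel cur acc hf
    obtain ⟨g, rfl⟩ := Nat.exists_eq_succ_of_ne_zero (by omega : fuel ≠ 0)
    match l with
    | [] =>
      rw [PySem.Chars.splitOn.go]
      · simp [pvSr, pvFindNil, pvAZ, pvConsHead]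
      · omega
    | c :: rest =>
      rw [PySem.Chars.splitOn.go]
      by_cases hp : pvAZ.isPrefixOf (c :: rest) = true
      · simp only [hp, if_true]
        have hlen3 : 2 ≤ rest.length := by
          have := (List.isPrefixOf_iff_prefix.mp hp).length_le
          simp [pvAZ] at this; omega
        have hl' : rest.length + 1 ≤ m + 1 := by simpa using hl
        have hf' : rest.length + 1 < g + 1 := by simpa using hf
        rw [ih (List.drop pvAZ.length (c :: rest)) (by simp [pvAZ]; omega) g [] _
          (by simp [pvAZ]; omega)]
        have hfind : PySem.Chars.find (c :: rest) pvAZ = 0 := by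
          rw [pvFindCons]; simp [hp]
        have hsr : pvSr (g + 1) (c :: rest)
            = [] :: pvSr g (List.drop 3 (c :: rest)) := by
          simp [pvSr, hfind]
        rw [hsr]
        simp only [List.reverse_nil]
        rw [pvConsHeadNil _ (pvSrNeNil _ _)]
        simp [pvConsHead, pvAZ]
      · simp only [hp]
        rw [ih rest (by simp at hl ⊢; omega) g (c :: cur) acc (by simp at hf ⊢; omega)]
        have hfind := pvFindCons pvAZ c rest
        rw [if_neg (by simp [hp])] at hfind
        by_cases hrest : PySem.Chars.find rest pvAZ = -1
        · have h1 : pvSr (g + 1) (c :: rest) = [c :: rest] := by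
            simp [pvSr, hfind, hrest]
          obtain ⟨g', rfl⟩ := Nat.exists_eq_succ_of_ne_zero
            (by simp at hf; omega : g ≠ 0)
          have h2 : pvSr (g' + 1) rest = [rest] := by
            simp [pvSr, hrest]
          rw [h1, h2]
          simp [pvConsHead]
        · have h0 : 0 ≤ PySem.Chars.find rest pvAZ := by
            have := PySem.Chars.neg_one_le_find rest pvAZ; omega
          set j : Nat := (PySem.Chars.find rest pvAZ).toNat with hjdef
          have hfj : PySem.Chars.find rest pvAZ = (j : Int) := by omega
          obtain ⟨-, hj3⟩ := pvFindSplit rest j hfj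
          have hfind' : PySem.Chars.find (c :: rest) pvAZ = ((j + 1 : Nat) : Int) := by
            rw [hfind, if_neg hrest, hfj]; push_cast; ring
          obtain ⟨g', rfl⟩ := Nat.exists_eq_succ_of_ne_zero
            (by simp at hf; omega : g ≠ 0)
          have h1 : pvSr (g' + 1 + 1) (c :: rest)
              = List.take (j + 1) (c :: rest)
                :: pvSr (g' + 1) (List.drop (j + 1 + 3) (c :: rest)) := by
            rw [pvSr]
            rw [if_neg (by rw [hfind']; omega)]
            rw [hfind']
            simp
          have h2 : pvSr (g' + 1) rest
              = List.take j rest :: pvSr g' (List.drop (j + 3) rest) := by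
            rw [pvSr, if_neg hrest, hfj]
            simp
          rw [h1, h2]
          have hdrop : List.drop (j + 1 + 3) (c :: rest) = List.drop (j + 3) rest := by
            simp [List.drop_succ_cons]
          have htake : List.take (j + 1) (c :: rest) = c :: List.take j rest := by
            simp [List.take_succ_cons]
          rw [hdrop, htake]
          rw [pvSr_fuel (rest.length) (List.drop (j + 3) rest) (by simp) g' (g' + 1)
            (by simp at hf ⊢; omega) (by simp at hf ⊢; omega)]
          simp [pvConsHead]

theorem pvSplitOnEqSr (s : List Char) :
    PySem.Chars.splitOn s pvAZ = pvSr (s.length + 1) s := by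
  unfold PySem.Chars.splitOn
  rw [pvGoEqSr s.length s le_rfl (s.length + 1) [] [] (by omega)]
  obtain ⟨g, hg⟩ := Nat.exists_eq_succ_of_ne_zero (by omega : s.length + 1 ≠ 0)
  rw [hg]
  by_cases hf : PySem.Chars.find s pvAZ = -1
  · simp [pvSr, hf, pvConsHead]
  · simp [pvSr, hf, pvConsHead]


-- canonical-fuel split recursion
def pvSR (l : List Char) : List (List Char) := pvSr (l.length + 1) l

theorem pvSRNeg (l : List Char) (h : PySem.Chars.find l pvAZ = -1) : pvSR l = [l] := by
  unfold pvSR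
  rw [pvSr, if_pos h]

theorem pvSRPos (l : List Char) (k : Nat) (h : PySem.Chars.find l pvAZ = (k : Int)) :
    pvSR l = List.take k l :: pvSR (List.drop (k + 3) l) := by
  obtain ⟨-, hk3⟩ := pvFindSplit l k h
  unfold pvSR
  rw [pvSr, if_neg (by omega), h]
  simp only [Int.toNat_natCast]
  rw [pvSr_fuel l.length (List.drop (k + 3) l) (by simp) l.length
    ((List.drop (k + 3) l).length + 1) (by simp; omega) (by simp)]

theorem pvSplitOnEqSR (l : List Char) : PySem.Chars.splitOn l pvAZ = pvSR l :=
  pvSplitOnEqSr l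

-- A's pipe truncation of one command
def pvTrunc (cs : List Char) : List Char :=
  PySem.List.slice cs none
    (some (if PySem.Chars.find cs ['|'] > -1 then PySem.Chars.find cs ['|'] else (cs.length : Int)))

theorem pvIsInFalse (l : List Char) (h : PySem.Chars.find l pvAZ = -1) :
    PySem.Chars.isIn pvAZ l = false := by
  simp [PySem.Chars.isIn, h]

theorem pvFindNilAZ : PySem.Chars.find [] pvAZ = -1 := by
  rw [pvFindNil]; simp [pvAZ]

theorem pvLoopAEq : ∀ (n : Nat) (l : List Char), l.length ≤ n → ∀ (acc : List (List Char)),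
    pvLoopA l acc = acc ++ (pvSR l).tail.map (fun seg => pvTrunc (pvAZ ++ seg)) := by
  intro n
  induction n with
  | zero =>
    intro l hl acc
    have : l = [] := List.length_eq_zero_iff.mp (by omega)
    subst this
    rw [pvLoopA, if_neg (by rw [pvIsInFalse _ pvFindNilAZ]; simp)]
    rw [pvSRNeg _ pvFindNilAZ]
    simp
  | succ m ih =>
    intro l hl acc
    by_cases hin : PySem.Chars.isIn pvAZ l = true
    · have hinf : pvAZ <:+: l := (PySem.Chars.isIn_iff_infix pvAZ l).mp hin
      have h0 : 0 ≤ PySem.Chars.find l pvAZ := (PySem.Chars.find_nonneg_iff l pvAZ).mpr hinf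
      obtain ⟨k, hk⟩ : ∃ k : Nat, PySem.Chars.find l pvAZ = (k : Int) :=
        ⟨(PySem.Chars.find l pvAZ).toNat, by omega⟩
      obtain ⟨hdk, hk3⟩ := pvFindSplit l k hk
      obtain ⟨r, hrdef⟩ : ∃ r, List.drop (k + 3) l = r := ⟨_, rfl⟩
      rw [hrdef] at hdk
      have hrlen : r.length + (k + 3) = l.length := by
        rw [← hrdef, List.length_drop]; omega
      have hdk1 : List.drop (k + 1) l = 'z' :: ' ' :: r := by
        have h1 : List.drop 1 (List.drop k l) = List.drop (k + 1) l := List.drop_drop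
        rw [← h1, hdk]
        simp [pvAZ]
      have hf1 : PySem.Chars.find (' ' :: r) pvAZ
          = if PySem.Chars.find r pvAZ = -1 then -1 else PySem.Chars.find r pvAZ + 1 := by
        rw [pvFindCons, if_neg (by simp [pvAZ, List.isPrefixOf])]
      have hfr : PySem.Chars.find (List.drop (k + 1) l) pvAZ
          = if PySem.Chars.find r pvAZ = -1 then -1 else PySem.Chars.find r pvAZ + 2 := by
        rw [hdk1, pvFindCons, if_neg (by simp [pvAZ, List.isPrefixOf]), hf1]
        by_cases hr : PySem.Chars.find r pvAZ = -1
        · simp [hr]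
        · have hge := PySem.Chars.neg_one_le_find r pvAZ
          rw [if_neg hr, if_neg (show ¬(PySem.Chars.find r pvAZ + 1 = -1) by omega), if_neg hr]
          ring
      have he0 : PySem.Chars.findFrom l pvAZ ((k : Int) + 1)
          = if PySem.Chars.find r pvAZ = -1 then -1
            else ((k : Int) + 3 + PySem.Chars.find r pvAZ) := by
        rw [show ((k : Int) + 1) = ((k + 1 : Nat) : Int) by push_cast; ring,
          PySem.Chars.findFrom_natCast l pvAZ (k + 1) (by omega), hfr]
        by_cases hr : PySem.Chars.find r pvAZ = -1
        · simp [hr]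
        · have hge := PySem.Chars.neg_one_le_find r pvAZ
          simp only [if_neg hr, if_neg (show ¬(PySem.Chars.find r pvAZ + 2 = -1) by omega)]
          push_cast; ring
      rw [pvLoopA, if_pos hin]
      simp only [hk, he0]
      by_cases hr : PySem.Chars.find r pvAZ = -1
      · -- last az command: it runs to the end of the string
        simp only [hr]
        norm_num
        have hcmd : PySem.List.slice l (some (k : Int)) (some (l.length : Int))
            = pvAZ ++ r := by
          rw [PySem.List.slice_natCast l k l.length]
          rw [List.take_of_length_le (by simp)]
          exact hdk
        rw [hcmd]
        rw [pvLoopA, if_neg (by simp [pvIsInFalse _ pvFindNilAZ])]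
        rw [pvSRPos l k hk, hrdef, pvSRNeg r hr]
        simp [pvTrunc]
      · -- another az command follows
        obtain ⟨j, hj⟩ : ∃ j : Nat, PySem.Chars.find r pvAZ = (j : Int) :=
          ⟨(PySem.Chars.find r pvAZ).toNat, by
            have := PySem.Chars.neg_one_le_find r pvAZ; omega⟩
        obtain ⟨hdj, hj3⟩ := pvFindSplit r j hj
        simp only [hj, if_neg (show ¬((j : Int) = -1) by omega)]
        rw [if_pos (show ((k : Int) + 3 + (j : Int)) > -1 by omega)]
        have hcmd : PySem.List.slice l (some (k : Int)) (some ((k : Int) + 3 + (j : Int)))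
            = pvAZ ++ List.take j r := by
          rw [show ((k : Int) + 3 + (j : Int)) = ((k + 3 + j : Nat) : Int) by push_cast; ring,
            PySem.List.slice_natCast l k (k + 3 + j)]
          rw [show k + 3 + j - k = 3 + j by omega, hdk]
          rw [List.take_append]
          rw [List.take_of_length_le (show (pvAZ : List Char).length ≤ 3 + j by simp [pvAZ])]
          simp [pvAZ]
        have hs' : PySem.List.slice l (some ((k : Int) + 3 + (j : Int))) = List.drop j r := by
          rw [show ((k : Int) + 3 + (j : Int)) = ((k + 3 + j : Nat) : Int) by push_cast; ring,
            PySem.List.slice_from l (by push_cast; omega)]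
          simp only [Int.toNat_natCast]
          rw [← hrdef, List.drop_drop]
        rw [hcmd, hs']
        have hlen' : (List.drop j r).length ≤ m := by
          simp only [List.length_drop]
          omega
        rw [ih (List.drop j r) hlen']
        have hfind0 : PySem.Chars.find (List.drop j r) pvAZ = ((0 : Nat) : Int) := by
          rw [hdj]
          show PySem.Chars.find ('a' :: 'z' :: ' ' :: List.drop (j + 3) r) pvAZ = _
          rw [pvFindCons, if_pos (by simp [pvAZ, List.isPrefixOf])]
          rfl
        rw [pvSRPos _ 0 hfind0]
        rw [show List.drop (0 + 3) (List.drop j r) = List.drop (j + 3) r by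
          rw [List.drop_drop]]
        rw [pvSRPos l k hk, hrdef, pvSRPos r j hj]
        simp [pvTrunc]
    · -- no az command in the text
      have hf : PySem.Chars.find l pvAZ = -1 := by
        by_contra hne
        exact hin ((PySem.Chars.isIn_iff_infix pvAZ l).mpr
          ((PySem.Chars.find_ne_neg_one_iff l pvAZ).mp hne))
      rw [pvLoopA, if_neg (by simp [hin])]
      rw [pvSRNeg l hf]
      simp

theorem pvShortOptEq : pvShortOptB = pvShortOptA := rfl

theorem pvSegBEq (seg : List Char) :
    pvSegB seg = pvParamsA (pvTrunc (pvAZ ++ seg)) := by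
  simp only [pvSegB, pvParamsA, pvTrunc, pvShortOptEq]
  by_cases hp : PySem.Chars.find (pvAZ ++ seg) ['|'] = -1
  · rw [if_neg (by simp [hp]), if_neg (show ¬(PySem.Chars.find (pvAZ ++ seg) ['|'] > -1) by omega)]
    rw [show PySem.List.slice (pvAZ ++ seg) none (some (((pvAZ ++ seg).length : Nat) : Int))
        = pvAZ ++ seg from by
      rw [PySem.List.slice_to _ (by omega)]
      simp only [Int.toNat_natCast, List.take_length]]
  · have h0 : -1 ≤ PySem.Chars.find (pvAZ ++ seg) ['|'] :=
      PySem.Chars.neg_one_le_find _ _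
    rw [if_pos hp, if_pos (show PySem.Chars.find (pvAZ ++ seg) ['|'] > -1 by omega)]

theorem pv_main : ∀ s : List Char,
    (pvLoopA s []).map pvParamsA
      = (PySem.List.slice (PySem.Chars.splitOn s pvAZ) (some 1)).map pvSegB := by
  intro s
  rw [pvLoopAEq s.length s le_rfl [], pvSplitOnEqSR]
  rw [PySem.List.slice_from _ (by omega : (0 : Int) ≤ 1)]
  simp only [List.nil_append, List.map_map, List.drop_one, Int.toNat_one]
  congr 1
  funext a
  simp [pvSegBEq, Function.comp]

-- ===== VERDICT (by name: the statement is the Claim_ definition above) =====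
theorem get_cmd_param_list_from_example_spec : Claim_equal_get_cmd_param_list_from_example := by
  intro s _
  unfold Spec_get_cmd_param_list_from_example get_cmd_param_list_from_example get_cmd_param_list_from_example_alt
  exact pv_main s.toList
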